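-- pv_equiv track=rewrite | github.com/anton13samarin/module_2_hard | module_2_hard.py | x_password
-- ===== SOURCE A (Python) =====
-- def x_password(number):
--     password = ''
--     a = 1
--     while a < number:
--         b = 2
--         while b < number:
--             if b <= a:
--                 b += 1
--                 continue
--             if number % (a + b) == 0:
--                 password += str(a) + str(b)
--             b += 1
--         a += 1
--     return password
-- ===== SOURCE B (Python) =====
-- def x_password(number):
--     divisors = [d for d in range(1, number + 1) if number % d == 0]
--     password = ''
--     for a in range(1, number):
--         for d in divisors:
--             if 2 * a < d < number + a:
--                 password += str(a) + str(d - a)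
--     return password
-- ===== Notes on version B (the rewrite author's own statement) =====
-- stated objective: faster
-- what changed: Instead of scanning all b below number for every a, B precomputes the divisor list of number once and, for each a, walks only the divisors d strictly between twice a and number plus a, emitting the pair via b = d - a.
import Mathlib
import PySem

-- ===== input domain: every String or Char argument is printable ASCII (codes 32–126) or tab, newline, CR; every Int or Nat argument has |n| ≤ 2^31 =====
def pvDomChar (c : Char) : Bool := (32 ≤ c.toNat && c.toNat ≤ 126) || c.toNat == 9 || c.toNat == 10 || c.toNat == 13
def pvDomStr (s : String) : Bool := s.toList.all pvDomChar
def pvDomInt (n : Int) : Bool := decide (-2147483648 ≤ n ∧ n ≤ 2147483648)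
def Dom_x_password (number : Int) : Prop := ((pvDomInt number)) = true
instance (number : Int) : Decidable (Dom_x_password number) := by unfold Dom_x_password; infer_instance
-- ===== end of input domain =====

-- B replaces A's quadratic double scan by a one-time divisor list of `number`
-- and, per a, a walk over the divisors d with 2a < d < number+a (b = d-a); faster.

-- ===== PORT A =====
-- inner while loop of A: b runs from its current value up to n; the Nat fuel only
-- makes the recursion structural, it is always ≥ (n - b).toNat at every call
def pvInnerA (n a : Int) : Nat → Int → String → String
  | 0, _, acc => acc
  | fuel + 1, b, acc =>
    if b < n then
      if b ≤ a then pvInnerA n a fuel (b + 1) acc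
      else if PySem.Int.mod n (a + b) = 0 then
        pvInnerA n a fuel (b + 1) (acc ++ (PySem.Int.toStr a ++ PySem.Int.toStr b))
      else pvInnerA n a fuel (b + 1) acc
    else acc

-- outer while loop of A: a runs from its current value up to n
def pvOuterA (n : Int) : Nat → Int → String → String
  | 0, _, acc => acc
  | fuel + 1, a, acc =>
    if a < n then pvOuterA n fuel (a + 1) (pvInnerA n a (n - 2).toNat 2 acc) else acc

def x_password (number : Int) : String := pvOuterA number (number - 1).toNat 1 ""

-- ===== PORT B =====
def x_password_alt (number : Int) : String :=
  let divisors := (PySem.List.pyRange 1 (number + 1) 1).filter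
    (fun d => decide (PySem.Int.mod number d = 0))
  (PySem.List.pyRange 1 number 1).foldl (fun password a =>
    divisors.foldl (fun password d =>
      if 2 * a < d ∧ d < number + a then
        password ++ (PySem.Int.toStr a ++ PySem.Int.toStr (d - a))
      else password) password) ""

-- ===== PRECONDITION & SPEC =====
def Spec_x_password (number : Int) (out : String) : Prop := out = x_password_alt number
instance (number : Int) (out : String) : Decidable (Spec_x_password number out) := by unfold Spec_x_password; infer_instance

-- ===== CLAIM (what is proved, stated in full; the proofs are below) =====
def Claim_equal_x_password : Prop := ∀ (number : Int), Dom_x_password number → Spec_x_password number (x_password number)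

-- ===== LEMMAS AND PROOFS =====

def pvCat : List String → String
  | [] => ""
  | s :: t => s ++ pvCat t

theorem pvCat_cons (s : String) (t : List String) : pvCat (s :: t) = s ++ pvCat t := rfl

theorem pvFoldl_str_if {α : Type} (l : List α) (p : α → Prop) [DecidablePred p]
    (g : α → String) (acc : String) :
    l.foldl (fun pw x => if p x then pw ++ g x else pw) acc
      = acc ++ pvCat ((l.filter (fun x => decide (p x))).map g) := by
  induction l generalizing acc with
  | nil => simp [pvCat]
  | cons x t ih =>
    by_cases hx : p x <;> simp [hx, ih, pvCat, String.append_assoc]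

theorem pvMap_add_pyRange (lo hi a : Int) :
    (PySem.List.pyRange lo hi 1).map (fun x => x + a)
      = PySem.List.pyRange (lo + a) (hi + a) 1 := by
  rw [PySem.List.pyRange_one, PySem.List.pyRange_one]
  have h : (hi + a - (lo + a)).toNat = (hi - lo).toNat := by omega
  rw [h, List.map_map]
  apply List.map_congr_left
  intro k _
  simp [Function.comp]
  omega

theorem pvFilter_pyRange_hi (p : Int → Bool) (lo hi hi' : Int)
    (h1 : lo ≤ hi) (h2 : hi ≤ hi')
    (h : ∀ d, hi ≤ d → d < hi' → p d = false) :
    (PySem.List.pyRange lo hi' 1).filter p = (PySem.List.pyRange lo hi 1).filter p := by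
  rw [PySem.List.pyRange_one_append lo hi hi' h1 h2, List.filter_append]
  have : (PySem.List.pyRange hi hi' 1).filter p = [] := by
    rw [List.filter_eq_nil_iff]
    intro d hd
    rw [PySem.List.mem_pyRange_one] at hd
    simp [h d hd.1 hd.2]
  simp [this]

theorem pvFilter_pyRange_lo (p : Int → Bool) (lo lo' hi : Int)
    (h1 : lo ≤ lo') (h2 : lo' ≤ hi)
    (h : ∀ d, lo ≤ d → d < lo' → p d = false) :
    (PySem.List.pyRange lo hi 1).filter p = (PySem.List.pyRange lo' hi 1).filter p := by
  rw [PySem.List.pyRange_one_append lo lo' hi h1 h2, List.filter_append]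
  have : (PySem.List.pyRange lo lo' 1).filter p = [] := by
    rw [List.filter_eq_nil_iff]
    intro d hd
    rw [PySem.List.mem_pyRange_one] at hd
    simp [h d hd.1 hd.2]
  simp [this]

-- the list of b produced by A's inner scan for a given a
def pvLa (n a : Int) : List Int :=
  (PySem.List.pyRange 2 n 1).filter (fun x => decide (a < x ∧ PySem.Int.mod n (a + x) = 0))

theorem pvInnerA_eq (n a : Int) : ∀ (fuel : Nat) (b : Int) (acc : String), (n - b).toNat ≤ fuel →
    pvInnerA n a fuel b acc
      = acc ++ pvCat (((PySem.List.pyRange b n 1).filter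
          (fun x => decide (a < x ∧ PySem.Int.mod n (a + x) = 0))).map
          (fun x => PySem.Int.toStr a ++ PySem.Int.toStr x)) := by
  intro fuel
  induction fuel with
  | zero =>
    intro b acc hb
    have hbn : n ≤ b := by omega
    simp [pvInnerA, PySem.List.pyRange_one_eq_nil hbn, pvCat]
  | succ k ih =>
    intro b acc hb
    by_cases hbn : b < n
    · rw [pvInnerA, if_pos hbn, PySem.List.pyRange_one_cons hbn]
      by_cases hba : b ≤ a
      · rw [List.filter_cons_of_neg (by simp; omega), if_pos hba, ih (b + 1) acc (by omega)]
      · by_cases hm : PySem.Int.mod n (a + b) = 0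
        · rw [List.filter_cons_of_pos (by simp; exact ⟨by omega, hm⟩), if_neg hba, if_pos hm,
              ih (b + 1) _ (by omega), List.map_cons, pvCat_cons, String.append_assoc]
        · rw [List.filter_cons_of_neg (by simp; tauto), if_neg hba, if_neg hm,
              ih (b + 1) acc (by omega)]
    · rw [pvInnerA, if_neg hbn]
      simp [PySem.List.pyRange_one_eq_nil (by omega : n ≤ b), pvCat]

theorem pvOuterA_eq (n : Int) : ∀ (fuel : Nat) (a : Int) (acc : String), (n - a).toNat ≤ fuel →
    pvOuterA n fuel a acc
      = acc ++ pvCat ((PySem.List.pyRange a n 1).map (fun a' =>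
          pvCat ((pvLa n a').map (fun x => PySem.Int.toStr a' ++ PySem.Int.toStr x)))) := by
  intro fuel
  induction fuel with
  | zero =>
    intro a acc ha
    have han : n ≤ a := by omega
    simp [pvOuterA, PySem.List.pyRange_one_eq_nil han, pvCat]
  | succ k ih =>
    intro a acc ha
    by_cases han : a < n
    · rw [pvOuterA, if_pos han, PySem.List.pyRange_one_cons han]
      rw [ih (a + 1) _ (by omega)]
      rw [pvInnerA_eq n a (n - 2).toNat 2 acc (by omega)]
      simp [pvCat, pvLa, String.append_assoc]
    · rw [pvOuterA, if_neg han]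
      simp [PySem.List.pyRange_one_eq_nil (by omega : n ≤ a), pvCat]

-- the divisor-walk list of B equals A's inner-scan list shifted by a
theorem pvLists_eq (n a : Int) (h1 : 1 ≤ a) (h2 : a < n) :
    (((PySem.List.pyRange 1 (n + 1) 1).filter (fun d => decide (PySem.Int.mod n d = 0))).filter
        (fun d => decide (2 * a < d ∧ d < n + a)))
      = (pvLa n a).map (fun x => x + a) := by
  have hn : 0 < n := by omega
  -- right side as a filter of a shifted range
  have hR : (pvLa n a).map (fun x => x + a)
      = (PySem.List.pyRange (2 + a) (n + a) 1).filter
          (fun d => decide (a < d - a ∧ PySem.Int.mod n (a + (d - a)) = 0)) := by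
    rw [← pvMap_add_pyRange 2 n a, List.filter_map]
    unfold pvLa
    congr 1
    apply List.filter_congr
    intro x _
    simp [Function.comp]
  rw [hR]
  -- left side: fuse the two filters into one decide
  rw [List.filter_filter]
  have hpred : (fun d => decide (2 * a < d ∧ d < n + a) && decide (PySem.Int.mod n d = 0))
      = (fun d : Int => decide ((2 * a < d ∧ d < n + a) ∧ PySem.Int.mod n d = 0)) := by
    funext d; simp
  rw [hpred]
  -- extend the left range up to n + a: no divisor of n lies in [n+1, n+a)
  have hfhi : ∀ d : Int, n + 1 ≤ d → d < n + a →
      decide ((2 * a < d ∧ d < n + a) ∧ PySem.Int.mod n d = 0) = false := by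
    intro d hd1 hd2
    simp only [decide_eq_false_iff_not]
    rintro ⟨-, hmod⟩
    have hdvd : d ∣ n := (PySem.Int.mod_eq_zero_iff_dvd n d).mp hmod
    have := Int.le_of_dvd hn hdvd
    omega
  -- extend the right range down to 1: the predicate forces d ≥ 2a+1 ≥ 2+a
  have hflo : ∀ d : Int, 1 ≤ d → d < 2 + a →
      decide (a < d - a ∧ PySem.Int.mod n (a + (d - a)) = 0) = false := by
    intro d hd1 hd2
    simp only [decide_eq_false_iff_not]
    omega
  rw [← pvFilter_pyRange_hi _ 1 (n + 1) (n + a) (by omega) (by omega) hfhi]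
  rw [← pvFilter_pyRange_lo _ 1 (2 + a) (n + a) (by omega) (by omega) hflo]
  -- same range, pointwise equal predicates
  apply List.filter_congr
  intro d hd
  rw [PySem.List.mem_pyRange_one] at hd
  have hda : a + (d - a) = d := by ring
  rw [hda, decide_eq_decide]
  constructor
  · rintro ⟨⟨h3, h4⟩, h5⟩; exact ⟨by omega, h5⟩
  · rintro ⟨h3, h4⟩; exact ⟨⟨by omega, by omega⟩, h4⟩

theorem pvFoldl_outer (l divs : List Int) (n : Int) (acc : String) :
    l.foldl (fun password a =>
      divs.foldl (fun password d =>
        if 2 * a < d ∧ d < n + a then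
          password ++ (PySem.Int.toStr a ++ PySem.Int.toStr (d - a))
        else password) password) acc
      = acc ++ pvCat (l.map (fun a =>
          pvCat ((divs.filter (fun d => decide (2 * a < d ∧ d < n + a))).map
            (fun d => PySem.Int.toStr a ++ PySem.Int.toStr (d - a))))) := by
  induction l generalizing acc with
  | nil => simp [pvCat]
  | cons a t ih =>
    simp only [List.foldl_cons, List.map_cons, pvCat_cons]
    rw [pvFoldl_str_if divs (fun d => 2 * a < d ∧ d < n + a)
          (fun d => PySem.Int.toStr a ++ PySem.Int.toStr (d - a)) acc, ih,
        String.append_assoc]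

-- ===== VERDICT (by name: the statement is the Claim_ definition above) =====
theorem x_password_spec : Claim_equal_x_password := by
  intro n _
  unfold Spec_x_password x_password
  simp only [x_password_alt]
  rw [pvFoldl_outer, pvOuterA_eq n (n - 1).toNat 1 "" (le_refl _)]
  refine congrArg (fun s => "" ++ s) (congrArg pvCat (List.map_congr_left ?_))
  intro a ha
  rw [PySem.List.mem_pyRange_one] at ha
  rw [pvLists_eq n a ha.1 ha.2, List.map_map]
  apply congrArg pvCat
  apply List.map_congr_left
  intro x _
  simp [Function.comp]
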